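-- pv_equiv track=rewrite | github.com/j0hnZ3RA/ldapx-py | src/ldapx/middlewares/helpers/string.py | get_previous_string
-- ===== SOURCE A (Python) =====
-- CHAR_ORDERING = "!\"#$%&'()*+,-./0123456789:;<=>?@ABCDEFGHIJKLMNOPQRSTUVWXYZ[\\]^_`abcdefghijklmnopqrstuvwxyz{|}~"
--
-- def get_previous_string(s):
--     chars = list(s)
--     for i in range(len(chars) - 1, -1, -1):
--         pos = CHAR_ORDERING.find(chars[i])
--         if pos > 0:
--             chars[i] = CHAR_ORDERING[pos - 1]
--             return "".join(chars)
--         chars[i] = CHAR_ORDERING[-1]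
--     if len(s) > 1:
--         return s[:-1]
--     return s
-- ===== SOURCE B (Python) =====
-- CHAR_ORDERING = "!\"#$%&'()*+,-./0123456789:;<=>?@ABCDEFGHIJKLMNOPQRSTUVWXYZ[\\]^_`abcdefghijklmnopqrstuvwxyz{|}~"
--
--
-- def get_previous_string(s):
--     # Single left-to-right pass recording the LAST index whose char can be
--     # decremented (the pivot), then build the answer in one expression:
--     # everything after the pivot becomes '~'.
--     pivot = -1
--     prev = ""
--     for i, ch in enumerate(s):
--         p = CHAR_ORDERING.find(ch)
--         if p > 0:
--             pivot = i
--             prev = CHAR_ORDERING[p - 1]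
--     if pivot >= 0:
--         return s[:pivot] + prev + "~" * (len(s) - 1 - pivot)
--     return s[:-1] if len(s) > 1 else s
-- ===== Notes on version B (the rewrite author's own statement) =====
-- stated objective: simpler
-- what changed: Replaces A's right-to-left scan with in-place list mutation and mid-loop returns by a single left-to-right pass that records the last decrementable index (pivot) and its decremented char, then builds the result in one expression with a repeated filler tilde character.
import Mathlib
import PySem

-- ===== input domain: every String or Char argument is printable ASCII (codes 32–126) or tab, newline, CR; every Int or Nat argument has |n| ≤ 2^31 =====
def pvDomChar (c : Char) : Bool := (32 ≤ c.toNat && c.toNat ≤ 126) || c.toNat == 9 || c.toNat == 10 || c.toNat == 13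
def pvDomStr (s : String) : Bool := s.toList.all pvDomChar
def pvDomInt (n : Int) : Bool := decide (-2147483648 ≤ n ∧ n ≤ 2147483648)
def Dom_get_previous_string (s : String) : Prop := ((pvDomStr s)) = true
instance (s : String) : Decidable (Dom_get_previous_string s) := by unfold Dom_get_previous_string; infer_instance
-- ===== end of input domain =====

-- B replaces A's right-to-left mutate-and-return loop by a single left-to-right
-- pass that records the last decrementable index, then builds the result in one
-- expression (objective: simpler).

-- CHAR_ORDERING as a list of chars (exact: Python str.find of a single char =
-- index of first occurrence, -1 if absent).
def pvOrd : List Char :=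
  "!\"#$%&'()*+,-./0123456789:;<=>?@ABCDEFGHIJKLMNOPQRSTUVWXYZ[\\]^_`abcdefghijklmnopqrstuvwxyz{|}~".toList

-- CHAR_ORDERING.find(c) for a single character c (exact)
def pvFind (c : Char) : Int :=
  match pvOrd.idxOf? c with
  | some j => (j : Int)
  | none => -1

-- ===== PORT A =====
-- the for-loop 'for i in range(len(chars)-1, -1, -1)' as structural recursion
-- on i+1; the list mutation chars[i] = … is List.set.
def pvALoop (chars : List Char) : Nat → Option (List Char)
  | 0 => none
  | i + 1 =>
    let pos := pvFind (chars.getD i '~')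
    if pos > 0 then
      some (chars.set i (pvOrd.getD (pos - 1).toNat '~'))
    else
      pvALoop (chars.set i '~') i      -- CHAR_ORDERING[-1] = '~'

def get_previous_string (s : String) : String :=
  match pvALoop s.toList s.toList.length with
  | some cs => String.ofList cs            -- "".join(chars)
  | none =>
    if s.toList.length > 1 then String.ofList s.toList.dropLast   -- s[:-1] (exact)
    else s

-- ===== PORT B =====
-- one foldl over enumerate(s): state = (pivot, prev); prev's initial value is
-- never read (Python's "" ), a Char placeholder here.
def pvBStep (st : Int × Char) (ic : Int × Char) : Int × Char :=
  let p := pvFind ic.2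
  if p > 0 then (ic.1, pvOrd.getD (p - 1).toNat '~') else st

def get_previous_string_alt (s : String) : String :=
  let st := (PySem.List.enumerate s.toList).foldl pvBStep (-1, '~')
  if st.1 ≥ 0 then
    String.ofList (s.toList.take st.1.toNat ++ [st.2] ++
               List.replicate (s.toList.length - 1 - st.1.toNat) '~')
  else if s.toList.length > 1 then String.ofList s.toList.dropLast else s

-- ===== PRECONDITION & SPEC =====
def Spec_get_previous_string (s : String) (out : String) : Prop := out = get_previous_string_alt s
instance (s : String) (out : String) : Decidable (Spec_get_previous_string s out) := by unfold Spec_get_previous_string; infer_instance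

-- ===== CLAIM (what is proved, stated in full; the proofs are below) =====
def Claim_equal_get_previous_string : Prop := ∀ (s : String), Dom_get_previous_string s → Spec_get_previous_string s (get_previous_string s)

-- ===== LEMMAS AND PROOFS =====

-- last index j of l with pvFind l[j] > 0, together with the decremented char
def pvPivot : List Char → Option (Nat × Char)
  | [] => none
  | c :: rest =>
    match pvPivot rest with
    | some (j, d) => some (j + 1, d)
    | none =>
      if pvFind c > 0 then some (0, pvOrd.getD (pvFind c - 1).toNat '~') else none

theorem pvPivot_lt {l : List Char} {j : Nat} {d : Char}
    (h : pvPivot l = some (j, d)) : j < l.length := by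
  induction l generalizing j d with
  | nil => simp [pvPivot] at h
  | cons c rest ih =>
    simp only [pvPivot] at h
    split at h
    · rename_i j' d' hr
      simp only [Option.some.injEq, Prod.mk.injEq] at h
      have := ih hr
      simp only [List.length_cons]
      omega
    · split at h
      · simp only [Option.some.injEq, Prod.mk.injEq] at h
        simp [← h.1]
      · simp at h

theorem pvPivot_append_one (l : List Char) (c : Char) :
    pvPivot (l ++ [c]) =
      if pvFind c > 0 then some (l.length, pvOrd.getD (pvFind c - 1).toNat '~')
      else pvPivot l := by
  induction l with
  | nil => simp [pvPivot]
  | cons a l ih =>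
    simp only [List.cons_append, pvPivot, ih]
    by_cases h : pvFind c > 0
    · simp [h]
    · simp only [h, if_false]

theorem pvSet_at_len (l : List Char) (c : Char) (t : List Char) (x : Char) :
    (l ++ c :: t).set l.length x = l ++ x :: t := by
  induction l with
  | nil => simp
  | cons a l _ => simp

theorem pvGetD_at_len (l : List Char) (c : Char) (t : List Char) :
    (l ++ c :: t).getD l.length '~' = c := by
  induction l with
  | nil => simp
  | cons a l _ => simp

theorem pvALoop_eq (l : List Char) :
    ∀ t : List Char,
      pvALoop (l ++ t) l.length =
        match pvPivot l with
        | some (j, d) =>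
            some (l.take j ++ d :: (List.replicate (l.length - 1 - j) '~' ++ t))
        | none => none := by
  induction l using List.reverseRecOn with
  | nil => intro t; simp [pvALoop, pvPivot]
  | append_singleton l c ih =>
    intro t
    rw [pvPivot_append_one]
    have hlen : (l ++ [c]).length = l.length + 1 := by simp
    rw [hlen]
    simp only [pvALoop, List.append_assoc, List.singleton_append,
      pvGetD_at_len, pvSet_at_len]
    by_cases h : pvFind c > 0
    · simp [h, List.take_left']
    · simp only [h, if_false]
      rw [ih ('~' :: t)]
      cases hp : pvPivot l with
      | none => simp
      | some p =>
        obtain ⟨j, d⟩ := p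
        have hj : j < l.length := pvPivot_lt hp
        simp only
        have ht : (l ++ [c]).take j = l.take j := by
          rw [List.take_append_of_le_length (by omega)]
        rw [ht]
        have hrep : List.replicate (l.length - 1 - j) '~' ++ '~' :: t =
            List.replicate (l.length + 1 - 1 - j) '~' ++ t := by
          have : l.length + 1 - 1 - j = (l.length - 1 - j) + 1 := by omega
          rw [this, List.replicate_succ']
          simp
        rw [hrep]

theorem pvFold_eq (l : List Char) :
    ∀ k : Int,
      (PySem.List.enumerate l k).foldl pvBStep (-1, '~') =
        match pvPivot l with
        | some (j, d) => (k + (j : Int), d)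
        | none => (-1, '~') := by
  induction l using List.reverseRecOn with
  | nil => intro k; simp [PySem.List.enumerate_nil, pvPivot]
  | append_singleton l c ih =>
    intro k
    rw [PySem.List.enumerate_append, PySem.List.enumerate_cons,
      PySem.List.enumerate_nil, List.foldl_append, ih k,
      pvPivot_append_one]
    by_cases h : pvFind c > 0
    · simp [h, pvBStep]
    · cases hp : pvPivot l <;> simp [h, pvBStep, List.foldl]

-- ===== VERDICT (by name: the statement is the Claim_ definition above) =====
theorem get_previous_string_spec : Claim_equal_get_previous_string := by
  intro s _
  unfold Spec_get_previous_string get_previous_string get_previous_string_alt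
  have hA := pvALoop_eq s.toList []
  rw [List.append_nil] at hA
  rw [hA, pvFold_eq s.toList 0]
  cases hp : pvPivot s.toList with
  | none => simp
  | some p =>
    obtain ⟨j, d⟩ := p
    have hj : j < s.toList.length := pvPivot_lt hp
    simp only [zero_add]
    have hge : ((j : Int) ≥ 0) := by positivity
    rw [if_pos hge]
    simp
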